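-- pv_equiv track=rewrite | github.com/Skailys/aoc2024 | 02/main.py | remove_unsafe
-- ===== SOURCE A (Python) =====
-- import copy
--
-- def test1a(report):
--     valid = True
--     for i in range(len(report) - 1):
--         if report[i] >= report[i + 1]:
--             valid = False
--             break
--
--     return valid
--
-- def test1b(report):
--     valid = True
--     for i in range(len(report) - 1):
--         if report[i] <= report[i + 1]:
--             valid = False
--             break
--
--     return valid
--
-- def test2(report):
--     valid = True
--     for i in range(len(report) - 1):
--         if abs(report[i] - report[i + 1]) > 3:
--             valid = False
--             break
--
--     return valid
--
-- def is_safe(report) -> bool: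
--     return (test1a(report) or test1b(report)) and test2(report)
--
-- def remove_unsafe(report):
--     variations = []
--
--     for i in range(len(report)):
--         report_copy = copy.deepcopy(report)
--         report_copy.pop(i)
--         variations.append(report_copy)
--
--     for variation in variations:
--         if is_safe(variation):
--             return variation
--
--     return report
-- ===== SOURCE B (Python) =====
-- def _first_bad(r, a, b):
--     # index of the first adjacent pair whose difference is outside [a, b], else None
--     for i, (x, y) in enumerate(zip(r, r[1:])):
--         if not (a <= y - x <= b):
--             return i
--     return None
--
-- def _ok(v, a, b):
--     return all(a <= y - x <= b for x, y in zip(v, v[1:]))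
--
-- def remove_unsafe(report):
--     if not report:
--         return report
--     ji = _first_bad(report, 1, 3)
--     jd = _first_bad(report, -3, -1)
--     if ji is None or jd is None:
--         return report[1:]
--     # a removal at any index outside {ji, ji+1, jd, jd+1} leaves the first bad
--     # pair of each direction adjacent, so only these four candidates can work
--     lo, hi = min(ji, jd), max(ji, jd)
--     for c in (lo, lo + 1, hi, hi + 1):
--         v = report[:c] + report[c + 1:]
--         if _ok(v, 1, 3) or _ok(v, -3, -1):
--             return v
--     return report
-- ===== Notes on version B (the rewrite author's own statement) =====
-- stated objective: faster
-- what changed: B replaces A's build-all-n-variations-and-test-each scan by a single pass that locates the first out-of-range adjacent pair for each direction and tests only the four candidate removal indices those two pairs allow.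
import Mathlib
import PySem

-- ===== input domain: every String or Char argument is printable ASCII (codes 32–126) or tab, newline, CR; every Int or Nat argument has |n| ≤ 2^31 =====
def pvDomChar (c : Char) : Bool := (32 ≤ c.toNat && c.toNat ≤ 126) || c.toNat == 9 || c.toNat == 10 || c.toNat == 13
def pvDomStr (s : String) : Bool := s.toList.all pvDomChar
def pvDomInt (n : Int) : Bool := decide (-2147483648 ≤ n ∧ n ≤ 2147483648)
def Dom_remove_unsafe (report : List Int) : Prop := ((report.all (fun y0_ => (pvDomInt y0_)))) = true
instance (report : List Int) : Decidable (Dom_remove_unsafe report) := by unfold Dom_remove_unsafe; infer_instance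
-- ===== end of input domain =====

-- B replaces A's try-every-removal scan (O(n^2)) by an O(n) scan: only a removal at
-- one of the first bad pairs' endpoints can make the report safe.

-- ===== PORT A =====
-- test1a: 'for i in range(len(report)-1): if report[i] >= report[i+1]: valid=False; break'
-- (indices produced by range are always in bounds, so pyGetD's default 0 is never used)
def test1aGo (report : List Int) : List Int → Bool
  | [] => true
  | i :: rest =>
    if PySem.List.pyGetD report i 0 ≥ PySem.List.pyGetD report (i + 1) 0 then false
    else test1aGo report rest

def test1a (report : List Int) : Bool :=
  test1aGo report (PySem.List.pyRange 0 ((report.length : Int) - 1) 1)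

def test1bGo (report : List Int) : List Int → Bool
  | [] => true
  | i :: rest =>
    if PySem.List.pyGetD report i 0 ≤ PySem.List.pyGetD report (i + 1) 0 then false
    else test1bGo report rest

def test1b (report : List Int) : Bool :=
  test1bGo report (PySem.List.pyRange 0 ((report.length : Int) - 1) 1)

def test2Go (report : List Int) : List Int → Bool
  | [] => true
  | i :: rest =>
    if |PySem.List.pyGetD report i 0 - PySem.List.pyGetD report (i + 1) 0| > 3 then false
    else test2Go report rest

def test2 (report : List Int) : Bool :=
  test2Go report (PySem.List.pyRange 0 ((report.length : Int) - 1) 1)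

def is_safe (report : List Int) : Bool := (test1a report || test1b report) && test2 report

-- the second loop: return the first safe variation, else the original report
def remove_unsafeScan (report : List Int) : List (List Int) → List Int
  | [] => report
  | v :: vs => if is_safe v then v else remove_unsafeScan report vs

-- deepcopy of a list of ints is a fresh equal list; report_copy.pop(i) is PySem.List.pop?
def remove_unsafe (report : List Int) : List Int :=
  remove_unsafeScan report
    ((PySem.List.pyRange 0 (report.length : Int) 1).foldl
      (fun acc i =>
        match PySem.List.pop? report i with
        | some (_, rest) => acc ++ [rest]
        | none => acc ++ [report])   -- unreachable: every i produced by range is in bounds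
      [])

-- ===== PORT B =====
-- _first_bad: first index of an adjacent pair whose difference is outside [a, b]
def firstBadGo (a b : Int) (i : Nat) : List (Int × Int) → Option Nat
  | [] => none
  | z :: rest =>
    if a ≤ z.2 - z.1 ∧ z.2 - z.1 ≤ b then firstBadGo a b (i + 1) rest else some i

def firstBad (r : List Int) (a b : Int) : Option Nat :=
  firstBadGo a b 0 (r.zip r.tail)

-- _ok: all adjacent differences inside [a, b]
def okB (v : List Int) (a b : Int) : Bool :=
  (v.zip v.tail).all fun p => decide (a ≤ p.2 - p.1 ∧ p.2 - p.1 ≤ b)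

-- the candidate loop of B (v = report[:c] + report[c+1:])
def tryCands (report : List Int) : List Nat → List Int
  | [] => report
  | c :: cs =>
    let v := report.take c ++ report.drop (c + 1)
    if okB v 1 3 || okB v (-3) (-1) then v else tryCands report cs

def remove_unsafe_alt (report : List Int) : List Int :=
  if report = [] then report
  else
    match firstBad report 1 3, firstBad report (-3) (-1) with
    | none, _ => PySem.List.slice report (some 1) none
    | some _, none => PySem.List.slice report (some 1) none
    | some ji, some jd =>
        tryCands report [min ji jd, min ji jd + 1, max ji jd, max ji jd + 1]

-- ===== PRECONDITION & SPEC =====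
def Spec_remove_unsafe (report : List Int) (out : List Int) : Prop := out = remove_unsafe_alt report
instance (report : List Int) (out : List Int) : Decidable (Spec_remove_unsafe report out) := by unfold Spec_remove_unsafe; infer_instance

-- ===== CLAIM (what is proved, stated in full; the proofs are below) =====
def Claim_equal_remove_unsafe : Prop := ∀ (report : List Int), Dom_remove_unsafe report → Spec_remove_unsafe report (remove_unsafe report)

-- ===== LEMMAS AND PROOFS =====

-- 'all adjacent differences of r lie in [a, b]'
def GoodP (a b : Int) (r : List Int) : Prop :=
  ∀ k, (h : k + 1 < r.length) →
    a ≤ r[k + 1] - r[k]'(Nat.lt_of_succ_lt h) ∧ r[k + 1] - r[k]'(Nat.lt_of_succ_lt h) ≤ b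

lemma okB_iff (v : List Int) (a b : Int) : okB v a b = true ↔ GoodP a b v := by
  unfold okB GoodP
  rw [List.all_eq_true]
  constructor
  · intro H k h
    have hz : k < (v.zip v.tail).length := by
      simp [List.length_zip]
      omega
    have := H _ (List.getElem_mem hz)
    rw [List.getElem_zip, List.getElem_tail] at this
    simpa using this
  · intro H p hp
    obtain ⟨k, hk, rfl⟩ := List.mem_iff_getElem.mp hp
    have hk' : k + 1 < v.length := by
      simp [List.length_zip] at hk
      omega
    rw [List.getElem_zip, List.getElem_tail]
    simpa using H k hk'

lemma firstBadGo_none (a b : Int) :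
    ∀ (zs : List (Int × Int)) (i : Nat), firstBadGo a b i zs = none →
      ∀ p ∈ zs, a ≤ p.2 - p.1 ∧ p.2 - p.1 ≤ b := by
  intro zs
  induction zs with
  | nil => intro i _ p hp; cases hp
  | cons z rest ih =>
    intro i h p hp
    unfold firstBadGo at h
    split at h
    · rcases List.mem_cons.mp hp with rfl | hp'
      · assumption
      · exact ih _ h p hp'
    · cases h

lemma firstBadGo_some (a b : Int) :
    ∀ (zs : List (Int × Int)) (i j : Nat), firstBadGo a b i zs = some j →
      i ≤ j ∧ ∃ h : j - i < zs.length,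
        ¬(a ≤ (zs[j - i]'h).2 - (zs[j - i]'h).1 ∧ (zs[j - i]'h).2 - (zs[j - i]'h).1 ≤ b) := by
  intro zs
  induction zs with
  | nil => intro i j h; cases h
  | cons z rest ih =>
    intro i j h
    unfold firstBadGo at h
    split at h
    · obtain ⟨h1, h2, h3⟩ := ih (i + 1) j h
      refine ⟨by omega, by simp; omega, ?_⟩
      have hji : j - i = (j - (i + 1)) + 1 := by omega
      simp only [hji, List.getElem_cons_succ]
      exact h3
    · rename_i hbad
      cases h
      refine ⟨le_refl _, by simp, ?_⟩
      simp only [Nat.sub_self, List.getElem_cons_zero]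
      exact hbad

lemma firstBad_none (r : List Int) (a b : Int) (h : firstBad r a b = none) : GoodP a b r := by
  intro k hk
  have hz : k < (r.zip r.tail).length := by simp [List.length_zip]; omega
  have := firstBadGo_none a b _ 0 h _ (List.getElem_mem hz)
  rw [List.getElem_zip, List.getElem_tail] at this
  simpa using this

lemma firstBad_some (r : List Int) (a b : Int) (j : Nat) (h : firstBad r a b = some j) :
    ∃ hj : j + 1 < r.length,
      ¬(a ≤ r[j + 1] - r[j]'(Nat.lt_of_succ_lt hj) ∧ r[j + 1] - r[j]'(Nat.lt_of_succ_lt hj) ≤ b) := by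
  obtain ⟨-, hlen, hbad⟩ := firstBadGo_some a b _ 0 j h
  simp only [Nat.sub_zero] at hlen hbad
  have hj : j + 1 < r.length := by
    simp [List.length_zip] at hlen
    omega
  refine ⟨hj, ?_⟩
  rw [List.getElem_zip, List.getElem_tail] at hbad
  simpa using hbad

-- a bad pair at j survives the removal of any index k ∉ {j, j+1}
lemma good_eraseIdx_pair (r : List Int) (a b : Int) (j k : Nat)
    (hj : j + 1 < r.length) (hk : k < r.length) (h1 : k ≠ j) (h2 : k ≠ j + 1)
    (hg : GoodP a b (r.eraseIdx k)) :
    a ≤ r[j + 1] - r[j]'(Nat.lt_of_succ_lt hj) ∧ r[j + 1] - r[j]'(Nat.lt_of_succ_lt hj) ≤ b := by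
  have hlen : (r.eraseIdx k).length = r.length - 1 := by
    rw [List.length_eraseIdx]; simp [hk]
  rcases Nat.lt_or_ge k j with hkj | hkj
  · -- k < j: the pair sits at index j-1 of the erased list
    have hm : (j - 1) + 1 < (r.eraseIdx k).length := by omega
    have := hg (j - 1) hm
    rw [List.getElem_eraseIdx, List.getElem_eraseIdx] at this
    simp only [show ¬((j - 1) + 1 < k) by omega, show ¬(j - 1 < k) by omega, dif_neg,
      not_false_iff] at this
    have e2 : (j - 1) + 1 = j := by omega
    simp only [e2] at this
    exact this
  · -- j + 1 < k: the pair is untouched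
    have hjk : j + 1 < k := by omega
    have hm : j + 1 < (r.eraseIdx k).length := by omega
    have := hg j hm
    rw [List.getElem_eraseIdx, List.getElem_eraseIdx] at this
    simp only [show j + 1 < k from hjk, show j < k by omega, dif_pos] at this
    exact this

-- ===== bridging A's tests to GoodP =====
lemma test1aGo_iff (r : List Int) :
    ∀ (m k : Nat), r.length - 1 ≤ k + m →
      (test1aGo r (PySem.List.pyRange (k : Int) ((r.length : Int) - 1) 1) = true ↔
        ∀ i : Nat, k ≤ i → (h : i + 1 < r.length) → r[i]'(Nat.lt_of_succ_lt h) < r[i + 1]) := by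
  intro m
  induction m with
  | zero =>
    intro k hk
    rw [PySem.List.pyRange_one_eq_nil (by omega)]
    simp only [test1aGo, true_iff]
    intro i hi h
    omega
  | succ m ih =>
    intro k hk
    by_cases hlt : (k : Int) < (r.length : Int) - 1
    · rw [PySem.List.pyRange_one_cons hlt]
      have hkk : k + 1 < r.length := by omega
      have hg1 : PySem.List.pyGetD r (k : Int) 0 = r[k]'(by omega) := by
        rw [PySem.List.pyGetD_natCast, List.getD_eq_getElem r 0 (by omega)]
      have hg2 : PySem.List.pyGetD r ((k : Int) + 1) 0 = r[k + 1] := by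
        rw [show ((k : Int) + 1) = ((k + 1 : Nat) : Int) by push_cast; ring,
          PySem.List.pyGetD_natCast, List.getD_eq_getElem r 0 hkk]
      unfold test1aGo
      rw [hg1, hg2]
      split
      · rename_i hge
        constructor
        · intro hf; cases hf
        · intro H
          exact absurd (H k (le_refl _) hkk) (not_lt.mpr hge)
      · rename_i hnge
        rw [show ((k : Int) + 1) = ((k + 1 : Nat) : Int) by push_cast; ring]
        rw [ih (k + 1) (by omega)]
        constructor
        · intro H i hi h
          rcases Nat.eq_or_lt_of_le hi with rfl | hlt'
          · omega
          · exact H i (by omega) h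
        · intro H i hi h
          exact H i (by omega) h
    · rw [PySem.List.pyRange_one_eq_nil (by omega)]
      simp only [test1aGo, true_iff]
      intro i hi h
      omega

lemma test1bGo_iff (r : List Int) :
    ∀ (m k : Nat), r.length - 1 ≤ k + m →
      (test1bGo r (PySem.List.pyRange (k : Int) ((r.length : Int) - 1) 1) = true ↔
        ∀ i : Nat, k ≤ i → (h : i + 1 < r.length) → r[i + 1] < r[i]'(Nat.lt_of_succ_lt h)) := by
  intro m
  induction m with
  | zero =>
    intro k hk
    rw [PySem.List.pyRange_one_eq_nil (by omega)]
    simp only [test1bGo, true_iff]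
    intro i hi h
    omega
  | succ m ih =>
    intro k hk
    by_cases hlt : (k : Int) < (r.length : Int) - 1
    · rw [PySem.List.pyRange_one_cons hlt]
      have hkk : k + 1 < r.length := by omega
      have hg1 : PySem.List.pyGetD r (k : Int) 0 = r[k]'(by omega) := by
        rw [PySem.List.pyGetD_natCast, List.getD_eq_getElem r 0 (by omega)]
      have hg2 : PySem.List.pyGetD r ((k : Int) + 1) 0 = r[k + 1] := by
        rw [show ((k : Int) + 1) = ((k + 1 : Nat) : Int) by push_cast; ring,
          PySem.List.pyGetD_natCast, List.getD_eq_getElem r 0 hkk]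
      unfold test1bGo
      rw [hg1, hg2]
      split
      · rename_i hge
        constructor
        · intro hf; cases hf
        · intro H
          exact absurd (H k (le_refl _) hkk) (not_lt.mpr hge)
      · rename_i hnge
        rw [show ((k : Int) + 1) = ((k + 1 : Nat) : Int) by push_cast; ring]
        rw [ih (k + 1) (by omega)]
        constructor
        · intro H i hi h
          rcases Nat.eq_or_lt_of_le hi with rfl | hlt'
          · omega
          · exact H i (by omega) h
        · intro H i hi h
          exact H i (by omega) h
    · rw [PySem.List.pyRange_one_eq_nil (by omega)]
      simp only [test1bGo, true_iff]
      intro i hi h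
      omega

lemma test2Go_iff (r : List Int) :
    ∀ (m k : Nat), r.length - 1 ≤ k + m →
      (test2Go r (PySem.List.pyRange (k : Int) ((r.length : Int) - 1) 1) = true ↔
        ∀ i : Nat, k ≤ i → (h : i + 1 < r.length) → |r[i]'(Nat.lt_of_succ_lt h) - r[i + 1]| ≤ 3) := by
  intro m
  induction m with
  | zero =>
    intro k hk
    rw [PySem.List.pyRange_one_eq_nil (by omega)]
    simp only [test2Go, true_iff]
    intro i hi h
    omega
  | succ m ih =>
    intro k hk
    by_cases hlt : (k : Int) < (r.length : Int) - 1
    · rw [PySem.List.pyRange_one_cons hlt]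
      have hkk : k + 1 < r.length := by omega
      have hg1 : PySem.List.pyGetD r (k : Int) 0 = r[k]'(by omega) := by
        rw [PySem.List.pyGetD_natCast, List.getD_eq_getElem r 0 (by omega)]
      have hg2 : PySem.List.pyGetD r ((k : Int) + 1) 0 = r[k + 1] := by
        rw [show ((k : Int) + 1) = ((k + 1 : Nat) : Int) by push_cast; ring,
          PySem.List.pyGetD_natCast, List.getD_eq_getElem r 0 hkk]
      unfold test2Go
      rw [hg1, hg2]
      split
      · rename_i hge
        constructor
        · intro hf; cases hf
        · intro H
          exact absurd (H k (le_refl _) hkk) (not_le.mpr hge)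
      · rename_i hnge
        rw [show ((k : Int) + 1) = ((k + 1 : Nat) : Int) by push_cast; ring]
        rw [ih (k + 1) (by omega)]
        constructor
        · intro H i hi h
          rcases Nat.eq_or_lt_of_le hi with rfl | hlt'
          · omega
          · exact H i (by omega) h
        · intro H i hi h
          exact H i (by omega) h
    · rw [PySem.List.pyRange_one_eq_nil (by omega)]
      simp only [test2Go, true_iff]
      intro i hi h
      omega

lemma is_safe_iff (r : List Int) :
    is_safe r = true ↔ GoodP 1 3 r ∨ GoodP (-3) (-1) r := by
  unfold is_safe test1a test1b test2
  rw [Bool.and_eq_true, Bool.or_eq_true,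
    show ((0 : Int) = ((0 : Nat) : Int)) by norm_num]
  rw [test1aGo_iff r (r.length - 1) 0 (by omega),
    test1bGo_iff r (r.length - 1) 0 (by omega),
    test2Go_iff r (r.length - 1) 0 (by omega)]
  unfold GoodP
  constructor
  · rintro ⟨hmono | hmono, habs⟩
    · left
      intro k hk
      have h1 := hmono k (Nat.zero_le _) hk
      have h2 := habs k (Nat.zero_le _) hk
      rw [abs_le] at h2
      omega
    · right
      intro k hk
      have h1 := hmono k (Nat.zero_le _) hk
      have h2 := habs k (Nat.zero_le _) hk
      rw [abs_le] at h2
      omega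
  · rintro (hg | hg)
    · refine ⟨Or.inl fun i _ h => ?_, fun i _ h => ?_⟩
      · have := hg i h; omega
      · have := hg i h; rw [abs_le]; omega
    · refine ⟨Or.inr fun i _ h => ?_, fun i _ h => ?_⟩
      · have := hg i h; omega
      · have := hg i h; rw [abs_le]; omega

lemma safeB_eq (v : List Int) : (okB v 1 3 || okB v (-3) (-1)) = is_safe v := by
  rw [Bool.eq_iff_iff, Bool.or_eq_true, okB_iff, okB_iff, is_safe_iff]

lemma good_tail (a b : Int) (r : List Int) (h : GoodP a b r) : GoodP a b r.tail := by
  intro k hk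
  have hk' : k + 1 + 1 < r.length := by
    simp [List.length_tail] at hk ⊢
    omega
  have := h (k + 1) hk'
  rw [List.getElem_tail, List.getElem_tail]
  exact this

-- A's variations list is exactly the list of single-index removals
lemma variations_eq (r : List Int) :
    ((PySem.List.pyRange 0 (r.length : Int) 1).foldl
      (fun acc i =>
        match PySem.List.pop? r i with
        | some (_, rest) => acc ++ [rest]
        | none => acc ++ [r]) []) =
    (List.range r.length).map (fun i => r.eraseIdx i) := by
  have hfold :
      ((PySem.List.pyRange 0 (r.length : Int) 1).foldl
        (fun acc i =>
          match PySem.List.pop? r i with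
          | some (_, rest) => acc ++ [rest]
          | none => acc ++ [r]) []) =
      (PySem.List.pyRange 0 (r.length : Int) 1).map
        (fun i =>
          match PySem.List.pop? r i with
          | some (_, rest) => rest
          | none => r) := by
    induction (PySem.List.pyRange 0 (r.length : Int) 1) using List.reverseRecOn with
    | nil => rfl
    | append_singleton xs x ih =>
      rw [List.foldl_append, List.map_append, ih, List.foldl_cons, List.foldl_nil,
        List.map_cons, List.map_nil]
      cases hpop : PySem.List.pop? r x with
      | none => simp
      | some pr => simp
  rw [hfold, PySem.List.pyRange_zero_nat, List.map_map]
  apply List.map_congr_left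
  intro i hi
  rw [List.mem_range] at hi
  simp only [Function.comp_apply]
  rw [PySem.List.pop?_natCast r i hi]

-- the scan over variations: skips unsafe prefixes, stops at the first safe removal
lemma scanA_none (r : List Int) :
    ∀ (c m : Nat), (∀ j, m ≤ j → j < m + c → is_safe (r.eraseIdx j) = false) →
      remove_unsafeScan r ((List.range' m c).map (fun i => r.eraseIdx i)) = r := by
  intro c
  induction c with
  | zero => intro m _; rfl
  | succ c ih =>
    intro m h
    rw [List.range'_succ, List.map_cons]
    unfold remove_unsafeScan
    rw [h m (le_refl _) (by omega)]
    simp only [Bool.false_eq_true, if_false]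
    exact ih (m + 1) fun j h1 h2 => h j (by omega) (by omega)

lemma scanA_hit (r : List Int) :
    ∀ (c m t : Nat), m ≤ t → t < m + c → is_safe (r.eraseIdx t) = true →
      (∀ j, m ≤ j → j < t → is_safe (r.eraseIdx j) = false) →
      remove_unsafeScan r ((List.range' m c).map (fun i => r.eraseIdx i)) = r.eraseIdx t := by
  intro c
  induction c with
  | zero => intro m t h1 h2; omega
  | succ c ih =>
    intro m t h1 h2 hs hmin
    rw [List.range'_succ, List.map_cons]
    unfold remove_unsafeScan
    rcases Nat.eq_or_lt_of_le h1 with rfl | hlt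
    · rw [hs]
      simp
    · rw [hmin m (le_refl _) hlt]
      simp only [Bool.false_eq_true, if_false]
      exact ih (m + 1) t hlt (by omega) hs fun j ha hb => hmin j (by omega) hb

-- any safe removal index lies among the four candidates
lemma feasible_mem (r : List Int) (ji jd : Nat)
    (hji : firstBad r 1 3 = some ji) (hjd : firstBad r (-3) (-1) = some jd)
    (k : Nat) (hk : k < r.length) (hsafe : is_safe (r.eraseIdx k) = true) :
    k = ji ∨ k = ji + 1 ∨ k = jd ∨ k = jd + 1 := by
  obtain ⟨hji1, hji2⟩ := firstBad_some r 1 3 ji hji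
  obtain ⟨hjd1, hjd2⟩ := firstBad_some r (-3) (-1) jd hjd
  rw [is_safe_iff] at hsafe
  by_contra hcon
  rw [not_or, not_or, not_or] at hcon
  obtain ⟨n1, n2, n3, n4⟩ := hcon
  rcases hsafe with hg | hg
  · exact hji2 (good_eraseIdx_pair r 1 3 ji k hji1 hk n1 n2 hg)
  · exact hjd2 (good_eraseIdx_pair r (-3) (-1) jd k hjd1 hk n3 n4 hg)

-- unfold one step of B's candidate loop into is_safe form
lemma tryCands_cons (r : List Int) (c : Nat) (cs : List Nat) :
    tryCands r (c :: cs) =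
      if is_safe (r.eraseIdx c) = true then r.eraseIdx c else tryCands r cs := by
  rw [List.eraseIdx_eq_take_drop_succ, ← safeB_eq]
  rfl

-- ===== VERDICT (by name: the statement is the Claim_ definition above) =====
theorem remove_unsafe_spec : Claim_equal_remove_unsafe := by
  intro report _
  unfold Spec_remove_unsafe remove_unsafe remove_unsafe_alt
  rw [variations_eq, List.range_eq_range']
  by_cases hnil : report = []
  · subst hnil
    rfl
  · rw [if_neg hnil]
    have hn : 1 ≤ report.length := by
      cases report with
      | nil => exact absurd rfl hnil
      | cons x xs => simp
    cases hji : firstBad report 1 3 with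
    | none =>
      have hsafe0 : is_safe (report.eraseIdx 0) = true := by
        rw [List.eraseIdx_zero, is_safe_iff]
        exact Or.inl (good_tail 1 3 report (firstBad_none report 1 3 hji))
      rw [scanA_hit report report.length 0 0 (le_refl _) (by omega) hsafe0
        (fun j h1 h2 => by omega)]
      rw [List.eraseIdx_zero, PySem.List.slice_from_one]
    | some ji =>
      cases hjd : firstBad report (-3) (-1) with
      | none =>
        have hsafe0 : is_safe (report.eraseIdx 0) = true := by
          rw [List.eraseIdx_zero, is_safe_iff]
          exact Or.inr (good_tail (-3) (-1) report (firstBad_none report (-3) (-1) hjd))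
        rw [scanA_hit report report.length 0 0 (le_refl _) (by omega) hsafe0
          (fun j h1 h2 => by omega)]
        rw [List.eraseIdx_zero, PySem.List.slice_from_one]
      | some jd =>
        obtain ⟨hji1, -⟩ := firstBad_some report 1 3 ji hji
        obtain ⟨hjd1, -⟩ := firstBad_some report (-3) (-1) jd hjd
        show remove_unsafeScan report _ =
          tryCands report [min ji jd, min ji jd + 1, max ji jd, max ji jd + 1]
        set lo := min ji jd with hlo
        set hi := max ji jd with hhi
        have hlon : lo + 1 < report.length := by omega
        have hhin : hi + 1 < report.length := by omega
        have hmem : ∀ k, k < report.length → is_safe (report.eraseIdx k) = true →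
            k = lo ∨ k = lo + 1 ∨ k = hi ∨ k = hi + 1 := by
          intro k hk hs
          have := feasible_mem report ji jd hji hjd k hk hs
          omega
        rw [tryCands_cons, tryCands_cons, tryCands_cons, tryCands_cons]
        by_cases h1 : is_safe (report.eraseIdx lo) = true
        · rw [if_pos h1]
          exact scanA_hit report report.length 0 lo (Nat.zero_le _) (by omega) h1
            (fun j hj1 hj2 => by
              by_contra hc
              rw [Bool.not_eq_false] at hc
              have := hmem j (by omega) hc
              omega)
        · rw [if_neg h1]
          by_cases h2 : is_safe (report.eraseIdx (lo + 1)) = true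
          · rw [if_pos h2]
            exact scanA_hit report report.length 0 (lo + 1) (Nat.zero_le _) (by omega) h2
              (fun j hj1 hj2 => by
                by_contra hc
                rw [Bool.not_eq_false] at hc
                have := hmem j (by omega) hc
                have hje : j = lo := by omega
                rw [hje] at hc
                exact h1 hc)
          · rw [if_neg h2]
            by_cases h3 : is_safe (report.eraseIdx hi) = true
            · rw [if_pos h3]
              exact scanA_hit report report.length 0 hi (Nat.zero_le _) (by omega) h3
                (fun j hj1 hj2 => by
                  by_contra hc
                  rw [Bool.not_eq_false] at hc
                  have := hmem j (by omega) hc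
                  have : j = lo ∨ j = lo + 1 := by omega
                  rcases this with rfl | rfl
                  · exact h1 hc
                  · exact h2 hc)
            · rw [if_neg h3]
              by_cases h4 : is_safe (report.eraseIdx (hi + 1)) = true
              · rw [if_pos h4]
                exact scanA_hit report report.length 0 (hi + 1) (Nat.zero_le _) (by omega) h4
                  (fun j hj1 hj2 => by
                    by_contra hc
                    rw [Bool.not_eq_false] at hc
                    have := hmem j (by omega) hc
                    have : j = lo ∨ j = lo + 1 ∨ j = hi := by omega
                    rcases this with rfl | rfl | rfl
                    · exact h1 hc
                    · exact h2 hc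
                    · exact h3 hc)
              · rw [if_neg h4]
                show remove_unsafeScan report _ = tryCands report []
                unfold tryCands
                exact scanA_none report report.length 0
                  (fun j hj1 hj2 => by
                    by_contra hc
                    rw [Bool.not_eq_false] at hc
                    have := hmem j (by omega) hc
                    rcases this with rfl | rfl | rfl | rfl
                    · exact h1 hc
                    · exact h2 hc
                    · exact h3 hc
                    · exact h4 hc)
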